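-- pv_equiv track=rewrite | github.com/flaskfarm/number_baseball | mod_main.py | make_info
-- ===== SOURCE A (Python) =====
-- def make_info(ret):
--     if len(ret) == 0: return []
--     data = []
--     for i in range(0, len(str(ret[0]))):
--         tmp = []
--         for _ in ret:
--             if str(_)[i] not in tmp:
--                 tmp.append(str(_)[i])
--         data.append(sorted(tmp))
--     return data
-- ===== SOURCE B (Python) =====
-- def _dedup(cs):
--     out = []
--     for c in cs:
--         if not out or c != out[-1]:
--             out.append(c)
--     return out
--
-- def make_info(ret):
--     strs = [str(x) for x in ret]
--     if not strs:
--         return []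
--     return [_dedup(sorted(s[i] for s in strs)) for i in range(len(strs[0]))]
-- ===== Notes on version B (the rewrite author's own statement) =====
-- stated objective: alternative
-- what changed: B builds each position's column of characters, sorts the multiset of characters first, and removes duplicates by a recursive adjacent-equality scan over the sorted column, instead of A's insertion-order membership-test dedup followed by a sort.
import Mathlib
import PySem

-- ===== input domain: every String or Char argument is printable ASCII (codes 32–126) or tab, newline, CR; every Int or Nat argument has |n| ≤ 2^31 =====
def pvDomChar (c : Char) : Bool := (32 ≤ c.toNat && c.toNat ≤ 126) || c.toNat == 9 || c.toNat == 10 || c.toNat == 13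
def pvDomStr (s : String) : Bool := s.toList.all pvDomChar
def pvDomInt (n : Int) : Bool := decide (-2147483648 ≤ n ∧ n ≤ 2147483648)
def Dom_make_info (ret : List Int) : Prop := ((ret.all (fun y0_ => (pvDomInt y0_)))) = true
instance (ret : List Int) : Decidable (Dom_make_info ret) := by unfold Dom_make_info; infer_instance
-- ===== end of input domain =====

-- B sorts each position's column of characters first and removes duplicates by a recursive
-- adjacent-equality scan, instead of A's membership-test insertion dedup followed by a sort
-- (alternative algorithm, same results).

-- ===== PORT A =====
-- str(_)[i]: i is always ≥ 0 here; getD is exact under Pre_ (out-of-range = IndexError, excluded by Pre_)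
def make_info (ret : List Int) : List (List String) :=
  if ret.length = 0 then [] else
    (PySem.List.pyRange 0 ((PySem.Int.toChars (PySem.List.pyGetD ret 0 0)).length : Int) 1).foldl
      (fun data i =>
        let tmp := ret.foldl (fun tmp x =>
          let c := (PySem.Int.toChars x).getD i.toNat ' '
          if c ∈ tmp then tmp else tmp ++ [c]) ([] : List Char)
        data ++ [(PySem.List.sorted tmp (fun c => c) false).map (fun c => String.ofList [c])]) []

-- ===== PORT B =====
-- _dedup: one pass over the sorted column, appending a char only when it differs from the last kept one
def pvDedup (cs : List Char) : List Char :=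
  cs.foldl (fun out c => if out = [] ∨ c ≠ out.getLastD ' ' then out ++ [c] else out) []

-- s[i]: in range under Pre_ (column index i < len of every string), getD is exact there
def make_info_alt (ret : List Int) : List (List String) :=
  let strs := ret.map (fun x => PySem.Int.toChars x)
  match strs with
  | [] => []
  | s0 :: _ =>
    (List.range s0.length).map (fun i =>
      (pvDedup (PySem.List.sorted (strs.map (fun s => s.getD i ' ')) (fun c => c) false)).map
        (fun c => String.ofList [c]))

-- ===== PRECONDITION & SPEC =====
-- Pre_ excludes exactly the inputs where A raises IndexError: some element's string is shorter than the first element's string.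
def Pre_make_info (ret : List Int) : Prop :=
  ∀ x ∈ ret, (PySem.Int.toChars (ret.headI)).length ≤ (PySem.Int.toChars x).length
instance (ret : List Int) : Decidable (Pre_make_info ret) := by unfold Pre_make_info; infer_instance
def pvWitness_make_info : List Int := [12, -3, 45]

def Spec_make_info (ret : List Int) (out : List (List String)) : Prop := out = make_info_alt ret
instance (ret : List Int) (out : List (List String)) : Decidable (Spec_make_info ret out) := by
  unfold Spec_make_info; infer_instance

-- ===== CLAIM (what is proved, stated in full; the proofs are below) =====
def Claim_equal_make_info : Prop :=
  ∀ (ret : List Int), Dom_make_info ret → Pre_make_info ret → Spec_make_info ret (make_info ret)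

-- ===== LEMMAS AND PROOFS =====

theorem le_getLast_of_pairwise_le (l : List Char) (b : Char) :
    l.Pairwise (· ≤ ·) → l.getLast? = some b → ∀ a ∈ l, a ≤ b := by
  induction l with
  | nil => intro _ h; cases h
  | cons x t ih =>
    intro hl hb a ha
    cases t with
    | nil =>
      simp only [List.getLast?_singleton, Option.some.injEq] at hb
      simp only [List.mem_singleton] at ha
      subst hb; subst ha
      exact le_refl _
    | cons y t' =>
      have htail : (y :: t').Pairwise (· ≤ ·) := hl.sublist (List.sublist_cons_self _ _)
      rw [List.getLast?_cons_cons] at hb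
      rcases List.mem_cons.mp ha with rfl | hat
      · exact (List.rel_of_pairwise_cons hl List.mem_cons_self).trans
          (ih htail hb y List.mem_cons_self)
      · exact ih htail hb a hat

-- invariant of B's dedup fold over a nondecreasing list: result strictly increasing, elements preserved
theorem pvDedup_fold_spec (cs : List Char) (acc : List Char)
    (hacc : acc.Pairwise (· < ·)) (hcs : cs.Pairwise (· ≤ ·))
    (hle : ∀ a ∈ acc, ∀ x ∈ cs, a ≤ x) :
    (cs.foldl (fun out c => if out = [] ∨ c ≠ out.getLastD ' ' then out ++ [c] else out) acc).Pairwise (· < ·)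
    ∧ ∀ y, (y ∈ cs.foldl (fun out c => if out = [] ∨ c ≠ out.getLastD ' ' then out ++ [c] else out) acc
        ↔ y ∈ acc ∨ y ∈ cs) := by
  induction cs generalizing acc with
  | nil => simpa using hacc
  | cons c cs' ih =>
    have hcs' : cs'.Pairwise (· ≤ ·) := hcs.sublist (List.sublist_cons_self _ _)
    have hcle : ∀ x ∈ cs', c ≤ x := fun x hx => List.rel_of_pairwise_cons hcs hx
    rw [List.foldl_cons]
    by_cases hb : acc = [] ∨ c ≠ acc.getLastD ' '
    · rw [if_pos hb]
      have hlt : ∀ a ∈ acc, a < c := by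
        intro a ha
        rcases hb with rfl | hne
        · cases ha
        · have hne' : acc ≠ [] := List.ne_nil_of_mem ha
          have hgl : acc.getLast? = some (acc.getLastD ' ') := by
            rw [List.getLastD_eq_getLast?, List.getLast?_eq_getLast_of_ne_nil hne']; rfl
          have h1 : a ≤ c := hle a ha c List.mem_cons_self
          have h2 : a ≤ acc.getLastD ' ' :=
            le_getLast_of_pairwise_le acc _ (hacc.imp le_of_lt) hgl a ha
          have h3 : acc.getLastD ' ' ≤ c :=
            hle _ (List.mem_of_getLast? hgl) c List.mem_cons_self
          rcases lt_or_eq_of_le h1 with h | rfl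
          · exact h
          · exact absurd (le_antisymm h3 h2) (Ne.symm hne)
      have hacc' : (acc ++ [c]).Pairwise (· < ·) := by
        rw [List.pairwise_append]
        refine ⟨hacc, List.pairwise_singleton _ _, ?_⟩
        intro a ha x hx
        simp only [List.mem_singleton] at hx
        subst hx
        exact hlt a ha
      have hle' : ∀ a ∈ acc ++ [c], ∀ x ∈ cs', a ≤ x := by
        intro a ha x hx
        rcases List.mem_append.mp ha with ha | ha
        · exact hle a ha x (List.mem_cons_of_mem _ hx)
        · simp only [List.mem_singleton] at ha; subst ha; exact hcle x hx
      obtain ⟨p, m⟩ := ih (acc ++ [c]) hacc' hcs' hle'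
      refine ⟨p, fun y => ?_⟩
      rw [m y]
      simp [or_assoc]
    · rw [if_neg hb]
      push Not at hb
      obtain ⟨hne, hcl⟩ := hb
      have hgl : acc.getLast? = some (acc.getLastD ' ') := by
        rw [List.getLastD_eq_getLast?, List.getLast?_eq_getLast_of_ne_nil hne]; rfl
      have hcmem : c ∈ acc := hcl ▸ List.mem_of_getLast? hgl
      obtain ⟨p, m⟩ := ih acc hacc hcs' (fun a ha x hx => hle a ha x (List.mem_cons_of_mem _ hx))
      refine ⟨p, fun y => ?_⟩
      rw [m y]
      constructor
      · rintro (h | h)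
        · exact Or.inl h
        · exact Or.inr (List.mem_cons_of_mem _ h)
      · rintro (h | h)
        · exact Or.inl h
        · rcases List.mem_cons.mp h with rfl | h
          · exact Or.inl hcmem
          · exact Or.inr h

-- core equality: sorted of the deduplicated column = adjacent-dedup of the sorted column
theorem sorted_ofList_eq_pvDedup_sorted (col : List Char) :
    PySem.List.sorted (PySem.Set.ofList col) (fun c => c) false
      = pvDedup (PySem.List.sorted col (fun c => c) false) := by
  obtain ⟨hpw, hmem⟩ := pvDedup_fold_spec (PySem.List.sorted col (fun c => c) false) []
    List.Pairwise.nil (PySem.List.sorted_pairwise col (fun c => c)) (by intro a ha; cases ha)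
  have hperm : (pvDedup (PySem.List.sorted col (fun c => c) false)).Perm
      (PySem.Set.ofList col) := by
    apply List.perm_of_nodup_nodup_toFinset_eq hpw.nodup (PySem.Set.nodup_ofList col)
    ext a
    simp only [List.mem_toFinset, PySem.Set.mem_ofList, hmem a]
    simp [PySem.List.mem_sorted]
  exact PySem.List.sorted_eq_of_perm_of_pairwise_lt _ _ _ hperm hpw

-- A's insertion-membership fold over ret at column i is set(column)
theorem foldA_eq_ofList (ret : List Int) (i : Nat) :
    ret.foldl (fun tmp x =>
        let c := (PySem.Int.toChars x).getD i ' '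
        if c ∈ tmp then tmp else tmp ++ [c]) ([] : List Char)
      = PySem.Set.ofList ((ret.map (fun x => PySem.Int.toChars x)).map (fun s => s.getD i ' ')) := by
  rw [PySem.Set.ofList_eq_foldl, List.foldl_map, List.foldl_map]
  congr 1
  funext tmp x
  rw [PySem.Set.add_eq_ite]

-- ===== VERDICT (by name: the statement is the Claim_ definition above) =====
theorem make_info_spec : Claim_equal_make_info := by
  intro ret _ _
  unfold Spec_make_info
  cases ret with
  | nil => rfl
  | cons r rs =>
    unfold make_info make_info_alt
    simp only [List.length_cons, List.map_cons, PySem.List.pyGetD_zero_cons]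
    rw [if_neg (by omega)]
    rw [PySem.List.foldl_append_singleton_eq_map
      (f := fun i : Int => (PySem.List.sorted
        ((r :: rs).foldl (fun tmp x =>
          if (PySem.Int.toChars x).getD i.toNat ' ' ∈ tmp then tmp
          else tmp ++ [(PySem.Int.toChars x).getD i.toNat ' ']) [])
        (fun c => c) false).map (fun c => String.ofList [c]))]
    rw [PySem.List.pyRange_zero_natCast, List.map_map, List.nil_append]
    apply List.map_congr_left
    intro k _
    simp only [Function.comp_apply, Int.toNat_natCast]
    have hA := foldA_eq_ofList (r :: rs) k
    simp only [List.map_cons] at hA ⊢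
    rw [hA, sorted_ofList_eq_pvDedup_sorted]
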